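-- pv_equiv track=rewrite | github.com/polawat789/AdventOfCode2023 | day14part01.py | solve
-- ===== SOURCE A (Python) =====
-- def solve(platform):
--     total = 0
--     for col in list(zip(*platform)):
--         last_value = len(col)
--         for index in range(0, len(col)):
--             if col[index] == "O":
--                 for i in reversed(range(0, index)):
--                     if col[i] == "O":
--                         last_value -= 1
--                         break
--                     elif col[i] == "#":
--                         last_value = len(col) - 1 - i
--                         break
--                 total += last_value
--     return total
-- ===== SOURCE B (Python) =====
-- def solve(platform):
--     total = 0
--     for col in zip(*platform):
--         n = len(col)
--         free = n  # load value of the next free slot in this column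
--         for j, c in enumerate(col):
--             if c == "#":
--                 free = n - 1 - j
--             elif c == "O":
--                 total += free
--                 free -= 1
--     return total
-- ===== Notes on version B (the rewrite author's own statement) =====
-- stated objective: simpler
-- what changed: Replaces the per-rock backward rescan of the column (inner reversed-range loop with break conditions) by a single forward pass per column tracking the load of the next free slot (reset on '#', decremented on 'O').
import Mathlib
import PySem

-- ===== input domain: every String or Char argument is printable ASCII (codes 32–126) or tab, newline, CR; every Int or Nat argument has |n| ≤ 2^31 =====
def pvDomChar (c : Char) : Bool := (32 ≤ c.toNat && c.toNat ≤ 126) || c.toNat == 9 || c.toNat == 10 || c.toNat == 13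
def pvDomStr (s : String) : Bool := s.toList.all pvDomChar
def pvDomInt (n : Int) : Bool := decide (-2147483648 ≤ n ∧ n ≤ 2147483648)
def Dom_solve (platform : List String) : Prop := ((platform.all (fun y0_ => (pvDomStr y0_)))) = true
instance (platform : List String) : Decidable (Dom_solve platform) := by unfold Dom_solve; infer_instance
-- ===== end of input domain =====

-- B replaces A's per-rock backward rescan of each column by one forward pass per column
-- tracking the load of the next free slot (objective: simpler).

-- ===== PORT A =====
-- shared helper: Python's zip(*platform) — columns, truncated as soon as any row is exhausted
def pyZipCols : List (List Char) → List (List Char)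
  | [] => []
  | r :: rs =>
    if (r :: rs).all (fun c => !c.isEmpty) then
      ((r :: rs).map (fun c => c.headD ' ')) :: pyZipCols ((r :: rs).map List.tail)
    else []
termination_by rows => (rows.headD []).length
decreasing_by
  rename_i h
  simp only [List.all_cons, Bool.and_eq_true, Bool.not_eq_true', List.isEmpty_eq_false_iff] at h
  simp only [List.map_cons, List.headD_cons]
  obtain ⟨h1, _⟩ := h
  cases r with
  | nil => exact absurd rfl h1
  | cons a as => simp

-- the inner 'for i in reversed(range(0, index))' scan of A, with its two break conditions
def backScan (col : List Char) (n lv : Int) : List Nat → Int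
  | [] => lv
  | i :: rest =>
    if col.getD i ' ' = 'O' then lv - 1
    else if col.getD i ' ' = '#' then n - 1 - (i : Int)
    else backScan col n lv rest

def solve (platform : List String) : Int :=
  (pyZipCols (platform.map String.toList)).foldl (fun total col =>
    let n : Int := col.length
    ((List.range col.length).foldl (fun (st : Int × Int) index =>
      if col.getD index ' ' = 'O' then
        let lv := backScan col n st.2 ((List.range index).reverse)
        (st.1 + lv, lv)
      else st) (total, n)).1) 0

-- ===== PORT B =====
def solve_alt (platform : List String) : Int :=
  (pyZipCols (platform.map String.toList)).foldl (fun total col =>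
    let n : Int := col.length
    ((PySem.List.enumerate col 0).foldl (fun (st : Int × Int) jc =>
      if jc.2 = '#' then (st.1, n - 1 - jc.1)
      else if jc.2 = 'O' then (st.1 + st.2, st.2 - 1)
      else st) (total, n)).1) 0

-- ===== PRECONDITION & SPEC =====
def Spec_solve (platform : List String) (out : Int) : Prop := out = solve_alt platform
instance (platform : List String) (out : Int) : Decidable (Spec_solve platform out) := by unfold Spec_solve; infer_instance

-- ===== CLAIM (what is proved, stated in full; the proofs are below) =====
def Claim_equal_solve : Prop := ∀ (platform : List String), Dom_solve platform → Spec_solve platform (solve platform)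

-- ===== LEMMAS AND PROOFS =====

-- A's step (state = (total, last_value)) and B's step (state = (total, free))
def stepA (col : List Char) (n : Int) (st : Int × Int) (index : Nat) : Int × Int :=
  if col.getD index ' ' = 'O' then
    let lv := backScan col n st.2 ((List.range index).reverse)
    (st.1 + lv, lv)
  else st

def stepB (n : Int) (st : Int × Int) (jc : Int × Char) : Int × Int :=
  if jc.2 = '#' then (st.1, n - 1 - jc.1)
  else if jc.2 = 'O' then (st.1 + st.2, st.2 - 1)
  else st

lemma getD_of_drop (col : List Char) (k : Nat) (c : Char) (rest : List Char)
    (h : col.drop k = c :: rest) : col.getD k ' ' = c := by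
  have h0 : (col.drop k)[0]? = col[k + 0]? := List.getElem?_drop
  rw [h] at h0
  simp only [List.getElem?_cons_zero, Nat.add_zero] at h0
  simp [List.getD, ← h0]

lemma backScan_succ (col : List Char) (n lv : Int) (k : Nat) :
    backScan col n lv ((List.range (k + 1)).reverse)
      = (if col.getD k ' ' = 'O' then lv - 1
         else if col.getD k ' ' = '#' then n - 1 - (k : Int)
         else backScan col n lv ((List.range k).reverse)) := by
  rw [List.range_succ, List.reverse_append]
  simp [backScan]

-- main invariant: if backScan over the processed prefix returns B's 'free', the two folds
-- over the remaining suffix produce the same total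
lemma main_inv (suffix : List Char) :
    ∀ (col : List Char) (n : Int) (k : Nat) (t lv free : Int),
      col.drop k = suffix →
      backScan col n lv ((List.range k).reverse) = free →
      ((List.range' k suffix.length).foldl (stepA col n) (t, lv)).1
        = ((PySem.List.enumerate suffix (k : Int)).foldl (stepB n) (t, free)).1 := by
  induction suffix with
  | nil => intro col n k t lv free _ _; simp [PySem.List.enumerate]
  | cons c rest ih =>
    intro col n k t lv free hdrop hback
    have hget : col.getD k ' ' = c := getD_of_drop col k c rest hdrop
    have hdrop' : col.drop (k + 1) = rest := by
      rw [← List.drop_drop]  -- drop 1 (drop k col)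
      simp [hdrop]
    have hlen : rest.length + 1 = (c :: rest).length := rfl
    rw [show (c :: rest).length = rest.length + 1 from rfl, List.range'_succ,
        PySem.List.enumerate_cons]
    simp only [List.foldl_cons]
    have hcast : (k : Int) + 1 = ((k + 1 : Nat) : Int) := by push_cast; ring
    by_cases hO : c = 'O'
    · have hA : stepA col n (t, lv) k = (t + free, free) := by
        unfold stepA; rw [hget]; simp [hO, hback]
      have hB : stepB n (t, free) ((k : Int), c) = (t + free, free - 1) := by
        simp [stepB, hO]
      rw [hA, hB, hcast]
      exact ih col n (k + 1) (t + free) free (free - 1) hdrop'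
        (by rw [backScan_succ, hget, hO]; simp)
    · by_cases hH : c = '#'
      · have hA : stepA col n (t, lv) k = (t, lv) := by
          unfold stepA; rw [hget]; simp [hH]
        have hB : stepB n (t, free) ((k : Int), c) = (t, n - 1 - (k : Int)) := by
          simp [stepB, hH]
        rw [hA, hB, hcast]
        exact ih col n (k + 1) t lv (n - 1 - (k : Int)) hdrop'
          (by rw [backScan_succ, hget]; simp [hH])
      · have hA : stepA col n (t, lv) k = (t, lv) := by
          unfold stepA; rw [hget]; simp [hO]
        have hB : stepB n (t, free) ((k : Int), c) = (t, free) := by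
          simp [stepB, hO, hH]
        rw [hA, hB, hcast]
        exact ih col n (k + 1) t lv free hdrop'
          (by rw [backScan_succ, hget]; simp [hO, hH, hback])

lemma col_eq (col : List Char) (t : Int) :
    ((List.range col.length).foldl (stepA col (col.length : Int)) (t, (col.length : Int))).1
      = ((PySem.List.enumerate col 0).foldl (stepB (col.length : Int)) (t, (col.length : Int))).1 := by
  have h := main_inv col col (col.length : Int) 0 t (col.length : Int) (col.length : Int)
    (by simp) (by simp [backScan])
  simpa [List.range_eq_range'] using h

lemma fold_cols : ∀ (cols : List (List Char)) (t : Int),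
    cols.foldl (fun total col =>
      ((List.range col.length).foldl (stepA col (col.length : Int)) (total, (col.length : Int))).1) t
      = cols.foldl (fun total col =>
      ((PySem.List.enumerate col 0).foldl (stepB (col.length : Int)) (total, (col.length : Int))).1) t := by
  intro cols
  induction cols with
  | nil => intro t; rfl
  | cons col cs ih => intro t; simp only [List.foldl_cons]; rw [col_eq, ih]

theorem solve_spec : Claim_equal_solve := by
  intro platform _
  show solve platform = solve_alt platform
  unfold solve solve_alt
  exact fold_cols (pyZipCols (platform.map String.toList)) 0

-- ===== VERDICT (by name: the statement is the Claim_ definition above) =====
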